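-- pv_equiv track=rewrite | github.com/jayluxferro/IoT-IDS | dos/func.py | getInterPacketArrival
-- ===== SOURCE A (Python) =====
-- def getInterPacketArrival(info):
--     res = []
--     counter = 0
--     holder = 0
--     for x in info:
--
--         if counter % 2 == 0:
--             # the first number
--             holder = x
--         else:
--             res.append(abs(x - holder))
--         counter = counter + 1
--
--     return res
-- ===== SOURCE B (Python) =====
-- def getInterPacketArrival(info):
--     # staged passes: split into the even-index and odd-index subsequences,
--     # then combine them positionally (zip truncates the unpaired leftover).
--     evens = info[0::2]
--     odds = info[1::2]
--     return [abs(b - a) for a, b in zip(evens, odds)]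
-- ===== Notes on version B (the rewrite author's own statement) =====
-- stated objective: alternative
-- what changed: Replaces A's single stateful pass (parity counter + holder) by staged passes: slice the list into its even-index and odd-index subsequences and then combine the two sequences positionally with zip, taking abs differences.
import Mathlib
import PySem

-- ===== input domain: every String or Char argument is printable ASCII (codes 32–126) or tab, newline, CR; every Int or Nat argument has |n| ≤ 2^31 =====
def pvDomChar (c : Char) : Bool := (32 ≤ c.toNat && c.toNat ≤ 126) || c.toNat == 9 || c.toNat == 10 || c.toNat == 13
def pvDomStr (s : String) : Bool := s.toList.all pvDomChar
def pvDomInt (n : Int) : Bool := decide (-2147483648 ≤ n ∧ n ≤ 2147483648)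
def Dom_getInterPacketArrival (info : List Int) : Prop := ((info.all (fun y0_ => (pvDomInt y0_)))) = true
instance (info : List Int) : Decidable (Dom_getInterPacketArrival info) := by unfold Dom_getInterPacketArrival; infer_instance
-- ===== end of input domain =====

-- B replaces A's single stateful pass (parity counter + holder) by staged passes:
-- slice out the even-index and odd-index subsequences, then zip them with abs difference.

-- ===== PORT A =====
-- A's loop: state (res, counter, holder), even counter stores holder, odd counter appends |x - holder|.
def pvGoA : List Int → List Int → Int → Int → List Int
  | [], res, _, _ => res
  | x :: t, res, counter, holder =>
    if PySem.Int.mod counter 2 = 0 then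
      pvGoA t res (counter + 1) x
    else
      pvGoA t (res ++ [|x - holder|]) (counter + 1) holder

def getInterPacketArrival (info : List Int) : List Int :=
  pvGoA info [] 0 0

-- ===== PORT B =====
-- hand port of the stepped slice xs[0::2] (PySem.List.slice has no step): every second element
def pvEvery2 : List Int → List Int
  | a :: _ :: t => a :: pvEvery2 t
  | [a] => [a]
  | [] => []

-- B: evens = info[0::2], odds = info[1::2] (= every second element of the tail),
-- then zip them positionally and take abs differences (zipWith truncates like zip).
def getInterPacketArrival_alt (info : List Int) : List Int :=
  List.zipWith (fun a b => |b - a|) (pvEvery2 info) (pvEvery2 info.tail)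

-- ===== PRECONDITION & SPEC =====
def Spec_getInterPacketArrival (info : List Int) (out : List Int) : Prop := out = getInterPacketArrival_alt info
instance (info : List Int) (out : List Int) : Decidable (Spec_getInterPacketArrival info out) := by unfold Spec_getInterPacketArrival; infer_instance

-- ===== CLAIM =====
def Claim_equal_getInterPacketArrival : Prop := ∀ (info : List Int), Dom_getInterPacketArrival info → Spec_getInterPacketArrival info (getInterPacketArrival info)

-- ===== LEMMAS AND PROOFS =====
theorem pvGoA_even : ∀ (info res : List Int) (k h : Int),
    pvGoA info res (2 * k) h
      = res ++ List.zipWith (fun a b => |b - a|) (pvEvery2 info) (pvEvery2 info.tail)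
  | [], res, k, h => by simp [pvGoA, pvEvery2]
  | [x], res, k, h => by
    have he : PySem.Int.mod (2 * k) 2 = 0 := by
      rw [PySem.Int.mod_eq_emod_of_pos (by norm_num : (0:Int) < 2)]; omega
    simp [pvGoA, pvEvery2]
  | x :: y :: t, res, k, h => by
    have he : PySem.Int.mod (2 * k) 2 = 0 := by
      rw [PySem.Int.mod_eq_emod_of_pos (by norm_num : (0:Int) < 2)]; omega
    have ho : ¬ PySem.Int.mod (2 * k + 1) 2 = 0 := by
      rw [PySem.Int.mod_eq_emod_of_pos (by norm_num : (0:Int) < 2)]; omega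
    have hrec := pvGoA_even t (res ++ [|y - x|]) (k + 1) x
    simp only [pvGoA, he, if_pos, ho, if_neg, not_false_iff]
    rw [show (2 : Int) * k + 1 + 1 = 2 * (k + 1) by ring, hrec]
    cases t with
    | nil => simp [pvEvery2]
    | cons z t' => simp [pvEvery2]

-- ===== VERDICT =====
theorem getInterPacketArrival_spec : Claim_equal_getInterPacketArrival := by
  intro info _
  unfold Spec_getInterPacketArrival getInterPacketArrival getInterPacketArrival_alt
  simpa using pvGoA_even info [] 0 0
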